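-- pv_equiv track=rewrite | github.com/HarshRangwala/Python | 5 Days of Coding Challenges/5 days coding challenge-  sum_of_cube_of_digits.py | sum_cubes
-- ===== SOURCE A (Python) =====
-- def sum_cubes (n,k):
--     while(k):
--         st = 0
--         for i in str(n):
--             num = int(i)**3
--             st += num
--         n = st
--         k = k-1
--     return st
-- ===== SOURCE B (Python) =====
-- def sum_cubes(n, k):
--     def step(m):
--         s = 0
--         while m > 0:
--             s += (m % 10) ** 3
--             m //= 10
--         return s
--     seen = {}
--     traj = []
--     while k > 0:
--         if n in seen:
--             j = seen[n]
--             c = len(traj) - j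
--             return traj[j + k % c]
--         seen[n] = len(traj)
--         traj.append(n)
--         n = step(n)
--         k -= 1
--     return n
-- ===== Notes on version B (the rewrite author's own statement) =====
-- stated objective: faster
-- what changed: B extracts digits arithmetically (% 10 and // 10 instead of iterating over str(n)) and, instead of performing all k rounds, records each value's first index in the trajectory, detects the first repeated value of the iterated map and jumps straight to trajectory[j + k % cycle_length]; Pre_ excludes exactly the inputs on which A never returns normally: k = 0 (UnboundLocalError, st is never assigned), n < 0 with k != 0 (ValueError on int('-')), and n >= 0 with k < 0 (while(k) never terminates).
import Mathlib
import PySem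

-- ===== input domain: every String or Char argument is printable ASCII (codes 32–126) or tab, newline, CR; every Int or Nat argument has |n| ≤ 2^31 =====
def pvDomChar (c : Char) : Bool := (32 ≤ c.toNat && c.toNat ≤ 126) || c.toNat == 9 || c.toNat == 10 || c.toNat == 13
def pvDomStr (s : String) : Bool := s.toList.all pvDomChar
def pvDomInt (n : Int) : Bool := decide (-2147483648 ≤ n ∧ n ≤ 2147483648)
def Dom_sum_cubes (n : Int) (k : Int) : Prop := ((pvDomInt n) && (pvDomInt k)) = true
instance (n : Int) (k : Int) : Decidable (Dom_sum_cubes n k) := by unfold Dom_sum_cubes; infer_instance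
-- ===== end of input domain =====

-- B replaces A's k full passes (string-converting n each round) by arithmetic digit
-- extraction plus first-repeat detection on the iterated map with a k-mod-cycle jump.

-- ===== PORT A =====
-- int(i)**3 for one digit character; ofChars? = none (ValueError, the '-' sign) is outside Pre_
def pvDigitCube (c : Char) : Int := ((PySem.Int.ofChars? [c]).getD 0) ^ 3

-- one round of A's while body: st = 0; for i in str(n): st += int(i)**3
def pvOnePass (n : Int) : Int :=
  (PySem.Int.toStr n).toList.foldl (fun st c => st + pvDigitCube c) 0

-- the while(k) loop, fueled by k.toNat (k = 0: A raises UnboundLocalError; k < 0: A never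
-- returns — both outside Pre_)
def pvLoopA : Nat → Int → Int
  | 0, n => n
  | f + 1, n => pvLoopA f (pvOnePass n)

def sum_cubes (n : Int) (k : Int) : Int := pvLoopA k.toNat n

-- ===== PORT B =====
-- termination helper for the digit loop (cited in decreasing_by)
lemma pvStepGo_dec (m : Int) (h : 0 < m) : (PySem.Int.floordiv m 10).toNat < m.toNat := by
  rw [PySem.Int.floordiv_eq_ediv_of_pos (by norm_num : (0:Int) < 10)]
  omega

-- Source B's step: s = 0; while m > 0: s += (m % 10)**3; m //= 10
def pvStepGo (m s : Int) : Int :=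
  if h : 0 < m then pvStepGo (PySem.Int.floordiv m 10) (s + (PySem.Int.mod m 10) ^ 3)
  else s
  termination_by m.toNat
  decreasing_by exact pvStepGo_dec m h

def pvStep (m : Int) : Int := pvStepGo m 0

-- Source B's main loop: seen maps value ↦ first index in traj; on a repeat, jump by k mod cycle
def pvLoopB (seen : PySem.Dict Int Int) (traj : List Int) (n k : Int) : Int :=
  if h : 0 < k then
    match PySem.Dict.get? seen n with
    | some j => PySem.List.pyGetD traj (j + PySem.Int.mod k ((traj.length : Int) - j)) 0
    | none =>
        pvLoopB (PySem.Dict.insert seen n (traj.length : Int)) (traj ++ [n]) (pvStep n) (k - 1)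
  else n
  termination_by k.toNat
  decreasing_by omega

def sum_cubes_alt (n : Int) (k : Int) : Int := pvLoopB PySem.Dict.empty [] n k

-- ===== PRECONDITION & SPEC =====
-- Pre_ excludes exactly the inputs on which A never returns: k = 0 (UnboundLocalError: st
-- is unbound), n < 0 with k ≠ 0 (ValueError: int('-')), and n ≥ 0 with k < 0 (while(k)
-- never terminates).
def Pre_sum_cubes (n : Int) (k : Int) : Prop := 1 ≤ k ∧ 0 ≤ n
instance (n : Int) (k : Int) : Decidable (Pre_sum_cubes n k) := by
  unfold Pre_sum_cubes; infer_instance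

def pvWitness_sum_cubes : Int × Int := (153, 4)

def Spec_sum_cubes (n : Int) (k : Int) (out : Int) : Prop := out = sum_cubes_alt n k
instance (n : Int) (k : Int) (out : Int) : Decidable (Spec_sum_cubes n k out) := by
  unfold Spec_sum_cubes; infer_instance

-- ===== CLAIM (what is proved, stated in full; the proofs are below) =====
def Claim_equal_sum_cubes : Prop :=
  ∀ (n : Int) (k : Int), Dom_sum_cubes n k → Pre_sum_cubes n k →
    Spec_sum_cubes n k (sum_cubes n k)

-- ===== LEMMAS AND PROOFS =====

-- the digit-cube-sum on Nat, the common value of one pass of either program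
def pvDcs (m : Nat) : Int :=
  if h : m = 0 then 0 else ((m % 10 : Nat) : Int) ^ 3 + pvDcs (m / 10)
  termination_by m
  decreasing_by exact Nat.div_lt_self (by omega) (by norm_num)

lemma pvDcs_nonneg (m : Nat) : 0 ≤ pvDcs m := by
  induction m using Nat.strong_induction_on with
  | _ m ih =>
    rw [pvDcs]
    split
    · exact le_refl 0
    · have h1 := ih (m / 10) (Nat.div_lt_self (by omega) (by norm_num))
      positivity

-- ---- B's step computes pvDcs ----
lemma pvStepGo_eq (mn : Nat) : ∀ s : Int, pvStepGo (mn : Int) s = s + pvDcs mn := by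
  induction mn using Nat.strong_induction_on with
  | _ mn ih =>
    intro s
    rw [pvStepGo]
    by_cases h : mn = 0
    · subst h; simp [pvDcs]
    · rw [dif_pos (by exact_mod_cast Nat.pos_of_ne_zero h)]
      rw [show ((10:Int)) = ((10:Nat):Int) from by norm_cast,
        PySem.Int.floordiv_natCast, PySem.Int.mod_natCast]
      rw [ih (mn / 10) (Nat.div_lt_self (Nat.pos_of_ne_zero h) (by norm_num))]
      conv_rhs => rw [pvDcs]
      rw [dif_neg h]
      ring

lemma pvStep_eq (m : Int) (h : 0 ≤ m) : pvStep m = pvDcs m.toNat := by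
  have := pvStepGo_eq m.toNat 0
  rw [Int.toNat_of_nonneg h] at this
  simpa [pvStep] using this

lemma pvStep_nonneg (m : Int) (h : 0 ≤ m) : 0 ≤ pvStep m := by
  rw [pvStep_eq m h]; exact pvDcs_nonneg _

-- ---- A's string pass computes pvDcs ----
def pvSC (cs : List Char) : Int := cs.foldl (fun st c => st + pvDigitCube c) 0

lemma pvFoldl_shift (cs : List Char) : ∀ s : Int,
    cs.foldl (fun st c => st + pvDigitCube c) s = s + pvSC cs := by
  induction cs with
  | nil => intro s; simp [pvSC]
  | cons c cs ih =>
      intro s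
      simp only [pvSC, List.foldl_cons]
      rw [ih, ih (0 + pvDigitCube c)]
      ring

lemma pvDigitCube_digitChar (d : Nat) (h : d < 10) :
    pvDigitCube (Nat.digitChar d) = ((d : Nat) : Int) ^ 3 := by
  interval_cases d <;> decide

lemma pvTdc_acc (b f : Nat) : ∀ (n : Nat) (ds : List Char),
    Nat.toDigitsCore b f n ds = Nat.toDigitsCore b f n [] ++ ds := by
  induction f with
  | zero => intro n ds; simp [Nat.toDigitsCore]
  | succ f ih =>
      intro n ds
      simp only [Nat.toDigitsCore]
      by_cases h : n / b = 0
      · simp [h]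
      · simp only [if_neg h]
        rw [ih (n / b) [(n % b).digitChar], ih (n / b) ((n % b).digitChar :: ds)]
        simp

lemma pvSC_toDigitsCore (f : Nat) : ∀ n : Nat, 0 < f → n < 10 ^ f →
    pvSC (Nat.toDigitsCore 10 f n []) = pvDcs n := by
  induction f with
  | zero => intro n h0 _; omega
  | succ f ih =>
      intro n _ hn
      simp only [Nat.toDigitsCore]
      by_cases h : n / 10 = 0
      · have h10 : n < 10 := by omega
        rw [if_pos h]
        have hd : n % 10 = n := Nat.mod_eq_of_lt h10
        rw [pvSC, List.foldl_cons, List.foldl_nil,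
          pvDigitCube_digitChar (n % 10) (Nat.mod_lt n (by norm_num))]
        rw [pvDcs]
        by_cases hz : n = 0
        · subst hz; simp
        · rw [dif_neg hz, pvDcs, dif_pos h]; ring
      · rw [if_neg h]
        rw [pvTdc_acc 10 f (n / 10) [(n % 10).digitChar]]
        have happ : pvSC (Nat.toDigitsCore 10 f (n / 10) [] ++ [(n % 10).digitChar]) =
            pvSC (Nat.toDigitsCore 10 f (n / 10) []) +
              pvSC [(n % 10).digitChar] := by
          simp only [pvSC, List.foldl_append]
          rw [pvFoldl_shift]
          rfl
        rw [happ]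
        have hf : 0 < f := by
          by_contra hf0
          have : f = 0 := by omega
          subst this
          have : n < 10 := by simpa using hn
          omega
        have hdiv : n / 10 < 10 ^ f := by
          rw [Nat.div_lt_iff_lt_mul (by norm_num)]
          calc n < 10 ^ (f + 1) := hn
            _ = 10 ^ f * 10 := by ring
        rw [ih (n / 10) hf hdiv]
        have hsing : pvSC [(n % 10).digitChar] = ((n % 10 : Nat) : Int) ^ 3 := by
          rw [show pvSC [(n % 10).digitChar] =
            0 + pvDigitCube ((n % 10).digitChar) from rfl,
            pvDigitCube_digitChar (n % 10) (Nat.mod_lt n (by omega))]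
          ring
        rw [hsing]
        conv_rhs => rw [pvDcs]
        rw [dif_neg (by omega : ¬ n = 0)]
        ring

lemma pvOnePass_eq (n : Int) (h : 0 ≤ n) : pvOnePass n = pvDcs n.toNat := by
  unfold pvOnePass
  rw [show (PySem.Int.toStr n).toList = PySem.Int.toChars n from PySem.Int.toList_toStr n]
  unfold PySem.Int.toChars
  rw [if_neg (by omega : ¬ n < 0)]
  unfold Nat.toDigits
  have hb : n.toNat < 10 ^ (n.toNat + 1) :=
    lt_of_lt_of_le (Nat.lt_pow_self (by norm_num))
      (Nat.pow_le_pow_right (by norm_num) (Nat.le_succ _))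
  have := pvSC_toDigitsCore (n.toNat + 1) n.toNat (by omega) hb
  simpa [pvSC] using this

-- ---- A's loop is the iterate of pvStep on nonnegative input ----
lemma pvLoopA_eq (f : Nat) : ∀ n : Int, 0 ≤ n → pvLoopA f n = pvStep^[f] n := by
  induction f with
  | zero => intro n _; simp [pvLoopA]
  | succ f ih =>
      intro n hn
      have h1 : pvOnePass n = pvStep n := by rw [pvOnePass_eq n hn, pvStep_eq n hn]
      rw [show pvLoopA (f + 1) n = pvLoopA f (pvOnePass n) from rfl, h1,
        ih (pvStep n) (pvStep_nonneg n hn), Function.iterate_succ_apply]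

-- ---- B's loop is the iterate of pvStep: trajectory/first-repeat invariant ----
lemma pvLoopB_eq : ∀ (kn : Nat) (k : Int), k.toNat = kn → 0 ≤ k →
    ∀ (t : Nat) (seen : PySem.Dict Int Int) (traj : List Int) (n0 n : Int),
      traj = (List.range t).map (fun i => pvStep^[i] n0) →
      n = pvStep^[t] n0 →
      (∀ x j, seen.get? x = some j →
        ∃ jn : Nat, j = (jn : Int) ∧ jn < t ∧ pvStep^[jn] n0 = x) →
      pvLoopB seen traj n k = pvStep^[kn] n := by
  intro kn
  induction kn with
  | zero =>
      intro k hk hk0 t seen traj n0 n _ _ _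
      have : k = 0 := by omega
      subst this
      rw [pvLoopB, dif_neg (by omega : ¬ (0:Int) < 0)]
      simp
  | succ kn ih =>
      intro k hk hk0 t seen traj n0 n htraj hn hseen
      have hkpos : 0 < k := by omega
      rw [pvLoopB, dif_pos hkpos]
      have hlen : traj.length = t := by rw [htraj]; simp
      cases hget : PySem.Dict.get? seen n with
      | some j =>
          obtain ⟨jn, hj, hjt, hjval⟩ := hseen n j hget
          -- the cycle length c = t - jn, positive
          have hc : (traj.length : Int) - j = ((t - jn : Nat) : Int) := by
            rw [hlen, hj]; omega
          have hcpos : 0 < t - jn := by omega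
          -- k % c as a Nat
          have hmod : PySem.Int.mod k ((traj.length : Int) - j) =
              (((kn + 1) % (t - jn) : Nat) : Int) := by
            rw [hc, show k = ((kn + 1 : Nat) : Int) by omega]
            exact PySem.Int.mod_natCast _ _
          have hr : (kn + 1) % (t - jn) < t - jn := Nat.mod_lt _ hcpos
          have hidx : jn + (kn + 1) % (t - jn) < t := by omega
          change PySem.List.pyGetD traj (j + PySem.Int.mod k ((traj.length : Int) - j)) 0 =
            pvStep^[kn + 1] n
          rw [hmod, hj, show ((jn : Int) + (((kn + 1) % (t - jn) : Nat) : Int)) =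
            ((jn + (kn + 1) % (t - jn) : Nat) : Int) by push_cast; ring]
          rw [PySem.List.pyGetD_natCast]
          rw [htraj, List.getD_eq_getElem?_getD]
          rw [List.getElem?_map, List.getElem?_range hidx]
          simp only [Option.map_some, Option.getD_some]
          -- periodicity: pvStep^[t - jn] n = n
          have hper : Function.IsPeriodicPt pvStep (t - jn) n := by
            show pvStep^[t - jn] n = n
            conv_lhs => rw [← hjval]
            rw [← Function.iterate_add_apply, show t - jn + jn = t by omega]
            exact hn.symm
          have hjump := hper.iterate_mod_apply (kn + 1)
          rw [show jn + (kn + 1) % (t - jn) = (kn + 1) % (t - jn) + jn by ring,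
            Function.iterate_add_apply, hjval, hjump]
      | none =>
          change pvLoopB (seen.insert n (traj.length : Int)) (traj ++ [n]) (pvStep n) (k - 1) =
            pvStep^[kn + 1] n
          have step1 : pvStep^[kn] (pvStep n) = pvStep^[kn + 1] n :=
            (Function.iterate_succ_apply pvStep kn n).symm
          rw [← step1]
          apply ih (k - 1) (by omega) (by omega) (t + 1) _ _ n0
          · rw [List.range_succ, List.map_append, ← htraj, hn]
            simp
          · rw [Function.iterate_succ_apply', hn]
          · intro x j hget'
            rw [hlen] at hget'
            rw [PySem.Dict.get?_insert] at hget'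
            by_cases hx : x = n
            · rw [if_pos hx] at hget'
              exact ⟨t, ((Option.some.injEq _ _).mp hget').symm, by omega, by rw [hx, hn]⟩
            · rw [if_neg hx] at hget'
              obtain ⟨jn, hj, hjt, hjval⟩ := hseen x j hget'
              exact ⟨jn, hj, by omega, hjval⟩

-- ===== VERDICT (by name: the statement is the Claim_ definition above) =====
theorem sum_cubes_spec : Claim_equal_sum_cubes := by
  unfold Claim_equal_sum_cubes
  intro n k _ hpre
  obtain ⟨hk, hn⟩ := hpre
  unfold Spec_sum_cubes sum_cubes sum_cubes_alt
  rw [pvLoopA_eq k.toNat n hn]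
  exact (pvLoopB_eq k.toNat k rfl (by omega) 0 PySem.Dict.empty [] n n (by simp) (by simp)
    (by intro x j h; rw [PySem.Dict.get?_empty] at h; exact absurd h (by simp))).symm
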